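-- pv_equiv track=rewrite | github.com/bolnet/attestor | scripts/lme_prompts.py | parse_category_response
-- ===== SOURCE A (Python) =====
-- CATEGORIES: list[str] = [
--     "temporal-reasoning",
--     "multi-session",
--     "knowledge-update",
--     "single-session-user",
--     "single-session-assistant",
--     "single-session-preference",
-- ]
--
-- def parse_category_response(raw: str, valid: list[str] | None = None) -> str:
--     """Extract a category name from a model's free-text reply.
--
--     Tolerant: strips quotes/punct, lowercases, then finds the first valid
--     category name as a substring. Returns 'UNKNOWN' if none match.
--     ``valid`` defaults to the full ``CATEGORIES`` list."""
--     valid_list = valid if valid is not None else CATEGORIES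
--     if raw is None:
--         return "UNKNOWN"
--     cleaned = (
--         raw.strip()
--         .strip("`*\"'")
--         .replace("_", "-")  # tolerate underscore variants
--         .lower()
--     )
--     if not cleaned:
--         return "UNKNOWN"
--     # Exact match first.
--     for c in valid_list:
--         if cleaned == c:
--             return c
--     # Then prefix match.
--     for c in valid_list:
--         if cleaned.startswith(c):
--             return c
--     # Then substring match.
--     for c in valid_list:
--         if c in cleaned:
--             return c
--     return "UNKNOWN"
-- ===== SOURCE B (Python) =====
-- CATEGORIES: list[str] = [
--     "temporal-reasoning",
--     "multi-session",
--     "knowledge-update",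
--     "single-session-user",
--     "single-session-assistant",
--     "single-session-preference",
-- ]
--
-- def parse_category_response(raw: str, valid: list[str] | None = None) -> str:
--     """Single-pass rewrite: rank each category (0 exact, 1 prefix, 2 substring)
--     and keep the first category with the strictly best rank."""
--     valid_list = valid if valid is not None else CATEGORIES
--     if raw is None:
--         return "UNKNOWN"
--     cleaned = raw.strip().strip("`*\"'").replace("_", "-").lower()
--     if not cleaned:
--         return "UNKNOWN"
--     best = None  # (rank, category); update only on strictly lower rank
--     for c in valid_list:
--         if cleaned == c:
--             r = 0
--         elif cleaned.startswith(c):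
--             r = 1
--         elif c in cleaned:
--             r = 2
--         else:
--             continue
--         if best is None or r < best[0]:
--             best = (r, c)
--     return best[1] if best is not None else "UNKNOWN"
-- ===== Notes on version B (the rewrite author's own statement) =====
-- stated objective: alternative
-- what changed: Replaced A's three sequential scans (exact, then prefix, then substring) with a single pass over valid_list that ranks each category (0/1/2) and keeps the first category of strictly lowest rank.
import Mathlib
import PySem

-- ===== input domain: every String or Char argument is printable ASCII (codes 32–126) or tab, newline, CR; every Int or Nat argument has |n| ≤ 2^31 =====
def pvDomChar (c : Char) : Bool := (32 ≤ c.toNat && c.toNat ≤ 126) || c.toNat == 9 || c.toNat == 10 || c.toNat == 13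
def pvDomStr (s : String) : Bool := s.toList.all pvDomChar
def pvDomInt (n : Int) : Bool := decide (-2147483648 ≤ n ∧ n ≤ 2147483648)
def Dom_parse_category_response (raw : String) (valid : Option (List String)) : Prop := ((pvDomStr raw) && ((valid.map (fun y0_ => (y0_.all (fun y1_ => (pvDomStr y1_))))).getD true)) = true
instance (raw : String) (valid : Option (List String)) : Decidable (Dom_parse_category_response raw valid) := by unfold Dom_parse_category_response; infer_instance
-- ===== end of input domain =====

-- B is an alternative single-pass ranking scan replacing A's three sequential scans; same cost class, no speed claim.

def pvCATEGORIES : List String :=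
  ["temporal-reasoning", "multi-session", "knowledge-update",
   "single-session-user", "single-session-assistant", "single-session-preference"]

def pvClean (raw : String) : String :=
  PySem.Str.lower (PySem.Str.replace (PySem.Str.stripChars (PySem.Str.strip raw) "`*\"'") "_" "-")

-- ===== PORT A =====
-- the three for-loops with early return, each as a recursive scan
def pvFindExact (cleaned : String) : List String → Option String
  | [] => none
  | c :: rest => if cleaned = c then some c else pvFindExact cleaned rest

def pvFindPrefix (cleaned : String) : List String → Option String
  | [] => none
  | c :: rest => if PySem.Str.startswith cleaned c then some c else pvFindPrefix cleaned rest

def pvFindSub (cleaned : String) : List String → Option String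
  | [] => none
  | c :: rest => if PySem.Str.isIn c cleaned then some c else pvFindSub cleaned rest

def parse_category_response (raw : String) (valid : Option (List String)) : String :=
  let valid_list := valid.getD pvCATEGORIES
  let cleaned := pvClean raw
  if cleaned = "" then "UNKNOWN"
  else
    match pvFindExact cleaned valid_list with
    | some c => c
    | none =>
      match pvFindPrefix cleaned valid_list with
      | some c => c
      | none =>
        match pvFindSub cleaned valid_list with
        | some c => c
        | none => "UNKNOWN"

-- ===== PORT B =====
-- rank of a category against the cleaned text: 0 exact, 1 prefix, 2 substring
def pvRank? (cleaned c : String) : Option Nat :=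
  if cleaned = c then some 0
  else if PySem.Str.startswith cleaned c then some 1
  else if PySem.Str.isIn c cleaned then some 2
  else none

-- the single loop: update the best (rank, category) only on a strictly lower rank
def pvLoopB (cleaned : String) : List String → Option (Nat × String) → Option (Nat × String)
  | [], best => best
  | c :: rest, best =>
    match pvRank? cleaned c with
    | none => pvLoopB cleaned rest best
    | some r =>
      match best with
      | none => pvLoopB cleaned rest (some (r, c))
      | some (br, bc) =>
        if r < br then pvLoopB cleaned rest (some (r, c))
        else pvLoopB cleaned rest (some (br, bc))

def parse_category_response_alt (raw : String) (valid : Option (List String)) : String :=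
  let valid_list := valid.getD pvCATEGORIES
  let cleaned := pvClean raw
  if cleaned = "" then "UNKNOWN"
  else
    match pvLoopB cleaned valid_list none with
    | some (_, c) => c
    | none => "UNKNOWN"

-- ===== PRECONDITION & SPEC =====
def Spec_parse_category_response (raw : String) (valid : Option (List String)) (out : String) : Prop := out = parse_category_response_alt raw valid
instance (raw : String) (valid : Option (List String)) (out : String) : Decidable (Spec_parse_category_response raw valid out) := by unfold Spec_parse_category_response; infer_instance

-- ===== CLAIM (what is proved, stated in full; the proofs are below) =====
def Claim_equal_parse_category_response : Prop := ∀ (raw : String) (valid : Option (List String)), Dom_parse_category_response raw valid → Spec_parse_category_response raw valid (parse_category_response raw valid)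

-- ===== LEMMAS AND PROOFS =====

-- exact match implies the prefix test, prefix implies the substring test
theorem pv_exact_prefix (cleaned c : String) (h : cleaned = c) :
    PySem.Str.startswith cleaned c = true := by
  subst h; simp [PySem.Chars.startswith_iff]

theorem pv_prefix_sub (cleaned c : String) (h : PySem.Str.startswith cleaned c = true) :
    PySem.Str.isIn c cleaned = true := by
  rw [PySem.Str.isIn_iff_infix]
  exact (by simpa [PySem.Chars.startswith_iff] using h : c.toList <+: cleaned.toList).isInfix

-- merging two best results: strictly lower rank on the right wins, ties keep the left
def pvMerge : Option (Nat × String) → Option (Nat × String) → Option (Nat × String)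
  | none, b => b
  | some a, none => some a
  | some (ar, ac), some (br, bc) => if br < ar then some (br, bc) else some (ar, ac)

theorem pvMerge_none_left (b : Option (Nat × String)) : pvMerge none b = b := rfl

theorem pvMerge_none_right (a : Option (Nat × String)) : pvMerge a none = a := by
  rcases a with _ | ⟨ar, ac⟩ <;> rfl

theorem pvMerge_assoc (a b c : Option (Nat × String)) :
    pvMerge (pvMerge a b) c = pvMerge a (pvMerge b c) := by
  rcases a with _ | ⟨ar, ac⟩ <;> rcases b with _ | ⟨br, bc⟩ <;> rcases c with _ | ⟨cr, cc⟩ <;>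
    try rfl
  · rw [pvMerge_none_right, pvMerge_none_right]
  · by_cases h1 : br < ar <;> by_cases h2 : cr < br <;> by_cases h3 : cr < ar <;>
      simp [pvMerge, h1, h2, h3] <;> omega

theorem pvLoopB_cons (cleaned c : String) (rest : List String) (best : Option (Nat × String)) :
    pvLoopB cleaned (c :: rest) best =
      pvLoopB cleaned rest (pvMerge best ((pvRank? cleaned c).map (fun r => (r, c)))) := by
  cases hr : pvRank? cleaned c with
  | none => simp only [pvLoopB, hr, Option.map_none, pvMerge_none_right]
  | some r =>
    rcases best with _ | ⟨br, bc⟩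
    · simp only [pvLoopB, hr, Option.map_some, pvMerge_none_left]
    · simp only [pvLoopB, hr, Option.map_some, pvMerge]
      split_ifs <;> rfl

theorem pvLoopB_merge (cleaned : String) (vs : List String) (best : Option (Nat × String)) :
    pvLoopB cleaned vs best = pvMerge best (pvLoopB cleaned vs none) := by
  induction vs generalizing best with
  | nil => cases best <;> simp [pvLoopB, pvMerge]
  | cons c rest ih =>
    rw [pvLoopB_cons, pvLoopB_cons, pvMerge_none_left]
    conv_lhs => rw [ih]
    conv_rhs => rw [ih]
    rw [pvMerge_assoc]

-- the characterization of the single best-rank pass by the three sequential scans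
theorem pvLoopB_char (cleaned : String) (vs : List String) :
    pvLoopB cleaned vs none =
      match pvFindExact cleaned vs with
      | some c => some (0, c)
      | none =>
        match pvFindPrefix cleaned vs with
        | some c => some (1, c)
        | none =>
          match pvFindSub cleaned vs with
          | some c => some (2, c)
          | none => none := by
  induction vs with
  | nil => rfl
  | cons c rest ih =>
    rw [pvLoopB_cons, pvMerge_none_left, pvLoopB_merge, ih]
    by_cases h0 : cleaned = c
    · subst h0
      have hp := pv_exact_prefix cleaned cleaned rfl
      have hs := pv_prefix_sub cleaned cleaned hp
      simp only [PySem.Str.startswith_eq] at hp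
      simp only [PySem.Str.isIn_eq] at hs
      rcases hx : pvFindExact cleaned rest with _ | x <;>
        rcases hq : pvFindPrefix cleaned rest with _ | y <;>
          rcases hz : pvFindSub cleaned rest with _ | z <;>
            simp [pvRank?, pvFindExact, pvFindPrefix, pvFindSub, pvMerge, hp, hs, hx, hq, hz]
    · by_cases h1 : PySem.Str.startswith cleaned c = true
      · have hs := pv_prefix_sub cleaned c h1
        simp only [PySem.Str.startswith_eq] at h1
        simp only [PySem.Str.isIn_eq] at hs
        rcases hx : pvFindExact cleaned rest with _ | x <;>
          rcases hq : pvFindPrefix cleaned rest with _ | y <;>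
            rcases hz : pvFindSub cleaned rest with _ | z <;>
              simp [pvRank?, pvFindExact, pvFindPrefix, pvFindSub, pvMerge, h0, h1, hs, hx, hq, hz]
      · simp only [PySem.Str.startswith_eq] at h1
        by_cases h2 : PySem.Str.isIn c cleaned = true
        · simp only [PySem.Str.isIn_eq] at h2
          rcases hx : pvFindExact cleaned rest with _ | x <;>
            rcases hq : pvFindPrefix cleaned rest with _ | y <;>
              rcases hz : pvFindSub cleaned rest with _ | z <;>
                simp [pvRank?, pvFindExact, pvFindPrefix, pvFindSub, pvMerge, h0, h1, h2, hx, hq, hz]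
        · simp only [PySem.Str.isIn_eq] at h2
          simp [pvRank?, pvFindExact, pvFindPrefix, pvFindSub, pvMerge, h0, h1, h2]

-- ===== VERDICT =====
theorem parse_category_response_spec : Claim_equal_parse_category_response := by
  intro raw valid _
  unfold Spec_parse_category_response parse_category_response parse_category_response_alt
  by_cases h : pvClean raw = ""
  · simp [h]
  · simp only [h, if_false]
    rw [pvLoopB_char]
    rcases hx : pvFindExact (pvClean raw) (valid.getD pvCATEGORIES) with _ | c <;>
      rcases hp : pvFindPrefix (pvClean raw) (valid.getD pvCATEGORIES) with _ | c' <;>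
        rcases hs : pvFindSub (pvClean raw) (valid.getD pvCATEGORIES) with _ | c'' <;> simp
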